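-- pv_equiv track=rewrite | github.com/Belmeurrr/project-grader | ml/pipelines/counterfeit/ensemble.py | combine_verdicts
-- ===== SOURCE A (Python) =====
-- from typing import Iterable
--
-- VERDICT_AUTHENTIC = "authentic"
--
-- VERDICT_SUSPICIOUS = "suspicious"
--
-- VERDICT_LIKELY_COUNTERFEIT = "likely_counterfeit"
--
-- VERDICT_UNVERIFIED = "unverified"
--
-- ALL_VERDICTS = frozenset(
--     {
--         VERDICT_AUTHENTIC,
--         VERDICT_SUSPICIOUS,
--         VERDICT_LIKELY_COUNTERFEIT,
--         VERDICT_UNVERIFIED,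
--     }
-- )
--
-- def combine_verdicts(verdicts: Iterable[str]) -> str:
--     """Conservative ensemble combiner.
--
--     Ranking, applied in order:
--       1. ANY detector with sufficient confidence flags LIKELY_COUNTERFEIT
--          → combined LIKELY_COUNTERFEIT. Counterfeit detection is high-
--          precision-on-true-positives by design; we'd rather flag a real
--          card for human review than pass a fake.
--       2. Else, if every confident detector says AUTHENTIC → AUTHENTIC
--          (consensus required for an authentic verdict).
--       3. Else, if any confident detector said SUSPICIOUS → SUSPICIOUS.
--       4. Else (all detectors abstained / no detectors ran) → UNVERIFIED.
--
--     Same policy as apps/api used to implement inline; consolidated here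
--     so the benchmark and production stay aligned.
--     """
--     verdicts_list = list(verdicts)
--     if not verdicts_list:
--         return VERDICT_UNVERIFIED
--     for v in verdicts_list:
--         if v not in ALL_VERDICTS:
--             raise ValueError(f"unknown verdict {v!r}; expected one of {ALL_VERDICTS}")
--     if any(v == VERDICT_LIKELY_COUNTERFEIT for v in verdicts_list):
--         return VERDICT_LIKELY_COUNTERFEIT
--     confident = [v for v in verdicts_list if v != VERDICT_UNVERIFIED]
--     if not confident:
--         return VERDICT_UNVERIFIED
--     if all(v == VERDICT_AUTHENTIC for v in confident):
--         return VERDICT_AUTHENTIC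
--     return VERDICT_SUSPICIOUS
-- ===== SOURCE B (Python) =====
-- from typing import Iterable
--
-- VERDICT_AUTHENTIC = "authentic"
-- VERDICT_SUSPICIOUS = "suspicious"
-- VERDICT_LIKELY_COUNTERFEIT = "likely_counterfeit"
-- VERDICT_UNVERIFIED = "unverified"
-- ALL_VERDICTS = frozenset(
--     {
--         VERDICT_AUTHENTIC,
--         VERDICT_SUSPICIOUS,
--         VERDICT_LIKELY_COUNTERFEIT,
--         VERDICT_UNVERIFIED,
--     }
-- )
--
-- # Severity lattice: the combined verdict is simply the JOIN (maximum severity)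
-- # of all verdicts.  unverified < authentic < suspicious < likely_counterfeit.
-- _SEVERITY = {
--     VERDICT_UNVERIFIED: 0,
--     VERDICT_AUTHENTIC: 1,
--     VERDICT_SUSPICIOUS: 2,
--     VERDICT_LIKELY_COUNTERFEIT: 3,
-- }
-- _BY_SEVERITY = [
--     VERDICT_UNVERIFIED,
--     VERDICT_AUTHENTIC,
--     VERDICT_SUSPICIOUS,
--     VERDICT_LIKELY_COUNTERFEIT,
-- ]
--
-- def combine_verdicts(verdicts: Iterable[str]) -> str:
--     """Single pass: fold the max severity rank, then read the verdict back.
--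
--     Correct because A's priority rules are exactly 'take the most severe
--     verdict seen' under the total order above (empty input folds to 0,
--     i.e. unverified, so no empty-guard is needed).
--     """
--     worst = 0
--     for v in verdicts:
--         r = _SEVERITY.get(v)
--         if r is None:
--             raise ValueError(f"unknown verdict {v!r}; expected one of {ALL_VERDICTS}")
--         worst = max(worst, r)
--     return _BY_SEVERITY[worst]
-- ===== Notes on version B (the rewrite author's own statement) =====
-- stated objective: alternative
-- what changed: B replaces A's priority-ordered branch scans (any counterfeit / filter confident / all authentic) by a single fold taking the maximum severity rank over a total order unverified<authentic<suspicious<likely_counterfeit, then maps the max rank back to its verdict; the empty guard disappears since an empty fold yields rank 0 (unverified).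
import Mathlib
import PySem

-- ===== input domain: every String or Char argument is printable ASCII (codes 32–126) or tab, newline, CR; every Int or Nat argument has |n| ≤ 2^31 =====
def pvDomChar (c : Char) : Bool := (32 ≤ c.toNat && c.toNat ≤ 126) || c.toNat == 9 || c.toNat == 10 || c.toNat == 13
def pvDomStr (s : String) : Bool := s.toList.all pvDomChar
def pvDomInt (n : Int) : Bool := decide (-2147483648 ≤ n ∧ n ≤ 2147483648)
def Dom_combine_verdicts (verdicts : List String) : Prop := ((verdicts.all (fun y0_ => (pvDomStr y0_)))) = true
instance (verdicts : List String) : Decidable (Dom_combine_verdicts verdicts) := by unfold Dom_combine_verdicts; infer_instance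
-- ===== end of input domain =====

-- B folds a single maximum-severity rank over the list instead of A's staged
-- priority scans; objective: alternative. Pre_ excludes inputs where A raises ValueError.


-- ===== PORT A =====
-- (A's validation loop raises ValueError on any verdict outside ALL_VERDICTS;
--  exactly those inputs are excluded by Pre_combine_verdicts, so the port proceeds directly.)
def combine_verdicts (verdicts : List String) : String :=
  if verdicts = [] then "unverified"
  else if verdicts.any (fun v => v == "likely_counterfeit") then "likely_counterfeit"
  else
    let confident := verdicts.filter (fun v => v != "unverified")
    if confident = [] then "unverified"
    else if confident.all (fun v => v == "authentic") then "authentic"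
    else "suspicious"

-- ===== PORT B =====
-- B's _SEVERITY.get returns None on unknown verdicts and Source B raises there;
-- those inputs are excluded by Pre_combine_verdicts, so the port maps them to rank 0.
def severityB (v : String) : Nat :=
  if v = "authentic" then 1
  else if v = "suspicious" then 2
  else if v = "likely_counterfeit" then 3
  else 0

-- worst is provably ≤ 3, so Python's _BY_SEVERITY[worst] never raises; getD is exact here.
def combine_verdicts_alt (verdicts : List String) : String :=
  let worst := verdicts.foldl (fun w v => max w (severityB v)) 0
  ["unverified", "authentic", "suspicious", "likely_counterfeit"].getD worst "unverified"

-- ===== PRECONDITION & SPEC =====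
-- Pre_ excludes exactly the inputs on which A (and B) raise ValueError: a verdict outside ALL_VERDICTS.
def Pre_combine_verdicts (verdicts : List String) : Prop :=
  ∀ v ∈ verdicts, v = "authentic" ∨ v = "suspicious" ∨ v = "likely_counterfeit" ∨ v = "unverified"
instance (verdicts : List String) : Decidable (Pre_combine_verdicts verdicts) := by
  unfold Pre_combine_verdicts; infer_instance
def pvWitness_combine_verdicts : List String := ["authentic", "suspicious", "unverified"]
def Spec_combine_verdicts (verdicts : List String) (out : String) : Prop := out = combine_verdicts_alt verdicts
instance (verdicts : List String) (out : String) : Decidable (Spec_combine_verdicts verdicts out) := by unfold Spec_combine_verdicts; infer_instance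

-- ===== CLAIM (what is proved, stated in full; the proofs are below) =====
def Claim_equal_combine_verdicts : Prop := ∀ (verdicts : List String), Dom_combine_verdicts verdicts → Pre_combine_verdicts verdicts → Spec_combine_verdicts verdicts (combine_verdicts verdicts)

-- ===== LEMMAS AND PROOFS =====

-- upper bound of the max-fold
theorem foldMax_le (l : List String) (a k : Nat) (ha : a ≤ k)
    (hl : ∀ v ∈ l, severityB v ≤ k) :
    l.foldl (fun w v => max w (severityB v)) a ≤ k := by
  induction l generalizing a with
  | nil => simpa using ha
  | cons x xs ih =>
      simp only [List.foldl_cons]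
      exact ih _ (by
        have := hl x (List.mem_cons_self)
        omega) (fun v hv => hl v (List.mem_cons_of_mem _ hv))

-- the accumulator is a lower bound of the max-fold
theorem le_foldMax (l : List String) (a : Nat) :
    a ≤ l.foldl (fun w v => max w (severityB v)) a := by
  induction l generalizing a with
  | nil => simp
  | cons x xs ih =>
      simp only [List.foldl_cons]
      exact le_trans (le_max_left _ _) (ih _)

-- every element's rank is a lower bound of the max-fold
theorem mem_le_foldMax (l : List String) (a : Nat) (v : String) (hv : v ∈ l) :
    severityB v ≤ l.foldl (fun w v => max w (severityB v)) a := by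
  induction l generalizing a with
  | nil => cases hv
  | cons x xs ih =>
      simp only [List.foldl_cons]
      rcases List.mem_cons.mp hv with h | h
      · exact h ▸ le_trans (le_max_right _ _) (le_foldMax _ _)
      · exact ih _ h

-- ===== VERDICT (by name: the statement is the Claim_ definition above) =====
theorem combine_verdicts_spec : Claim_equal_combine_verdicts := by
  intro verdicts _ hpre
  unfold Spec_combine_verdicts combine_verdicts combine_verdicts_alt
  by_cases hnil : verdicts = []
  · simp [hnil]
  · simp only [hnil, if_false]
    by_cases hc : "likely_counterfeit" ∈ verdicts
    · have hW : verdicts.foldl (fun w v => max w (severityB v)) 0 = 3 := by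
        have hlb : 3 ≤ verdicts.foldl (fun w v => max w (severityB v)) 0 :=
          le_trans (by decide) (mem_le_foldMax verdicts 0 "likely_counterfeit" hc)
        have hub := foldMax_le verdicts 0 3 (by omega) (fun v _ => by
          unfold severityB; split_ifs <;> omega)
        omega
      have h1 : verdicts.any (fun v => v == "likely_counterfeit") = true := by
        simp only [List.any_eq_true]
        exact ⟨"likely_counterfeit", hc, by decide⟩
      simp [h1, hW]
    · have h1 : verdicts.any (fun v => v == "likely_counterfeit") = false := by
        simp only [List.any_eq_false]
        intro v hv
        simp only [beq_iff_eq]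
        intro h; exact hc (h ▸ hv)
      simp only [h1]
      by_cases hall : ∀ v ∈ verdicts, v = "unverified"
      · have hf : verdicts.filter (fun v => v != "unverified") = [] := by
          simp only [List.filter_eq_nil_iff]
          intro v hv; simp [hall v hv]
        have hW : verdicts.foldl (fun w v => max w (severityB v)) 0 = 0 := by
          have hub := foldMax_le verdicts 0 0 (by omega) (fun v hv => by
            simp [severityB, hall v hv])
          omega
        simp [hf, hW]
      · push Not at hall
        obtain ⟨w, hw, hwne⟩ := hall
        have hf : verdicts.filter (fun v => v != "unverified") ≠ [] := by
          simp only [ne_eq, List.filter_eq_nil_iff]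
          intro h; exact hwne (by simpa using h w hw)
        have hge1 : 1 ≤ verdicts.foldl (fun w v => max w (severityB v)) 0 := by
          refine le_trans ?_ (mem_le_foldMax verdicts 0 w hw)
          rcases hpre w hw with h | h | h | h
          · simp [severityB, h]
          · simp [severityB, h]
          · exact absurd (h ▸ hw) hc
          · exact absurd h hwne
        simp only [hf, if_false]
        by_cases hs : "suspicious" ∈ verdicts
        · have hW : verdicts.foldl (fun w v => max w (severityB v)) 0 = 2 := by
            have hlb : 2 ≤ verdicts.foldl (fun w v => max w (severityB v)) 0 :=
              le_trans (by decide) (mem_le_foldMax verdicts 0 "suspicious" hs)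
            have hub : verdicts.foldl (fun w v => max w (severityB v)) 0 ≤ 2 := by
              refine foldMax_le verdicts 0 2 (by omega) (fun v hv => ?_)
              unfold severityB
              split_ifs with h1' h2' h3'
              · omega
              · omega
              · exact absurd (h3' ▸ hv) hc
              · omega
            omega
          have ha : (verdicts.filter (fun v => v != "unverified")).all (fun v => v == "authentic") = false := by
            simp only [List.all_eq_false]
            refine ⟨"suspicious", ?_, by decide⟩
            exact List.mem_filter.mpr ⟨hs, by decide⟩
          simp [ha, hW]
        · have hW : verdicts.foldl (fun w v => max w (severityB v)) 0 = 1 := by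
            have hub : verdicts.foldl (fun w v => max w (severityB v)) 0 ≤ 1 := by
              refine foldMax_le verdicts 0 1 (by omega) (fun v hv => ?_)
              rcases hpre v hv with h | h | h | h
              · simp [severityB, h]
              · exact absurd (h ▸ hv) hs
              · exact absurd (h ▸ hv) hc
              · simp [severityB, h]
            omega
          have ha : (verdicts.filter (fun v => v != "unverified")).all (fun v => v == "authentic") = true := by
            simp only [List.all_eq_true]
            intro v hv
            have hm := List.mem_filter.mp hv
            have hne : v ≠ "unverified" := by simpa using hm.2
            rcases hpre v hm.1 with h | h | h | h
            · simp [h]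
            · exact absurd (h ▸ hm.1) hs
            · exact absurd (h ▸ hm.1) hc
            · exact absurd h hne
          simp [ha, hW]
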